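-- pv_equiv track=rewrite | github.com/ashish-greycube/alsahly | alsahly/jinja.py | get_ordered_deduction_data
-- ===== SOURCE A (Python) =====
-- def get_ordered_deduction_data(pe_data, re_data, je_data):
--     ordered_data = []
--     ordered_dates = []
--
--     for pe in pe_data:
--         if pe.get('date') not in ordered_dates:
--             ordered_dates.append(pe.get('date'))
--     for re in re_data:
--         if re.get('date') not in ordered_dates:
--             ordered_dates.append(re.get('date'))
--     for je in je_data:
--         if je.get('date') not in ordered_dates:
--             ordered_dates.append(je.get('date'))
--
--     ordered_dates = sorted(ordered_dates)
--
--     for od in ordered_dates: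
--         for pe in pe_data:
--             if pe.get('date') == od:
--                 ordered_data.append(pe)
--         for re in re_data:
--             if re.get('date') == od:
--                 ordered_data.append(re)
--         for je in je_data:
--             if je.get('date') == od:
--                 ordered_data.append(je)
--
--     return ordered_data
-- ===== SOURCE B (Python) =====
-- def get_ordered_deduction_data(pe_data, re_data, je_data):
--     groups = {}
--     for entry in pe_data + re_data + je_data:
--         groups.setdefault(entry.get('date'), []).append(entry)
--     ordered_data = []
--     for d in sorted(groups):
--         ordered_data.extend(groups[d])
--     return ordered_data
-- ===== Notes on version B (the rewrite author's own statement) =====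
-- stated objective: alternative
-- what changed: B groups entries by date into a dict in one pass and emits the groups for the sorted keys, instead of A's dedup-the-dates list (with linear membership tests) followed by a rescan of all three lists for every distinct date.
import Mathlib
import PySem

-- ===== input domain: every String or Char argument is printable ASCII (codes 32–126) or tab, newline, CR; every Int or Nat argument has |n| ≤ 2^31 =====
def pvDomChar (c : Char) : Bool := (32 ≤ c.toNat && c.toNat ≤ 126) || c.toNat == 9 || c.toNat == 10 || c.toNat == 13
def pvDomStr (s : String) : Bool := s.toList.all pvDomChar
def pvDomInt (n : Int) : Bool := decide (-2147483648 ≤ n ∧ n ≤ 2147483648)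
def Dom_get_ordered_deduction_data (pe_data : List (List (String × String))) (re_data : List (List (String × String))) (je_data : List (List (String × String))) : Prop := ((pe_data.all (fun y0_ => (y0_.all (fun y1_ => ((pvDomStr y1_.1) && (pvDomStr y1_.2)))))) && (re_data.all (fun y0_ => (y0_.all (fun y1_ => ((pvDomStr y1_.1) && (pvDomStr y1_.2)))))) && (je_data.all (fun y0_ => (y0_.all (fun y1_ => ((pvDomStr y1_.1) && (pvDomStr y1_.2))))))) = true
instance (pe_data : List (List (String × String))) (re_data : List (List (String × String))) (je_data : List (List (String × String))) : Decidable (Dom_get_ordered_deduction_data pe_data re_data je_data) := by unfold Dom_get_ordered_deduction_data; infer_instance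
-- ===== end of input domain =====

-- B groups entries by date into a dict in one pass and emits the groups for the sorted keys,
-- instead of A's dedup-the-dates pass followed by a rescan of all three lists per distinct date.

-- entry.get('date') : the dict lookup (first match in the association list)
def pvDate (e : List (String × String)) : Option String := (PySem.Dict.mk e).get? "date"

-- ===== PORT A =====
-- Python's sorted on the date values is ported with key (·.getD ""): exact under Pre_, where the
-- dates are either all missing (the sorted list is the singleton [none]) or all strings.
def get_ordered_deduction_data (pe_data : List (List (String × String))) (re_data : List (List (String × String))) (je_data : List (List (String × String))) : List (List (String × String)) :=
  let d1 := pe_data.foldl (fun acc pe => if pvDate pe ∈ acc then acc else acc ++ [pvDate pe]) []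
  let d2 := re_data.foldl (fun acc re => if pvDate re ∈ acc then acc else acc ++ [pvDate re]) d1
  let d3 := je_data.foldl (fun acc je => if pvDate je ∈ acc then acc else acc ++ [pvDate je]) d2
  let ordered_dates := PySem.List.sorted d3 (fun o => o.getD "") false
  ordered_dates.foldl (fun acc od =>
    let acc := pe_data.foldl (fun a pe => if pvDate pe = od then a ++ [pe] else a) acc
    let acc := re_data.foldl (fun a re => if pvDate re = od then a ++ [re] else a) acc
    je_data.foldl (fun a je => if pvDate je = od then a ++ [je] else a) acc) []

-- ===== PORT B =====
-- groups.setdefault(k, []).append(e) is modify k [] (· ++ [e]); groups[d] is getD d []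
-- (the key is always present, so Python's [] never raises).
def get_ordered_deduction_data_alt (pe_data : List (List (String × String))) (re_data : List (List (String × String))) (je_data : List (List (String × String))) : List (List (String × String)) :=
  let groups := (pe_data ++ re_data ++ je_data).foldl
      (fun g e => g.modify (pvDate e) [] (· ++ [e])) PySem.Dict.empty
  (PySem.List.sorted groups.keys (fun o => o.getD "") false).foldl
      (fun out d => out ++ groups.getD d []) []

-- ===== PRECONDITION & SPEC =====
-- Pre_ excludes exactly the inputs where Python A raises TypeError (sorted over a mix of None and
-- str dates, i.e. some entry lacks the 'date' key while another has it); B raises the same way there.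
def Pre_get_ordered_deduction_data (pe_data : List (List (String × String))) (re_data : List (List (String × String))) (je_data : List (List (String × String))) : Prop :=
  (∀ e ∈ pe_data ++ re_data ++ je_data, (pvDate e).isSome = true) ∨
  (∀ e ∈ pe_data ++ re_data ++ je_data, (pvDate e).isSome = false)
instance (pe_data : List (List (String × String))) (re_data : List (List (String × String))) (je_data : List (List (String × String))) : Decidable (Pre_get_ordered_deduction_data pe_data re_data je_data) := by unfold Pre_get_ordered_deduction_data; infer_instance
def pvWitness_get_ordered_deduction_data : (List (List (String × String))) × (List (List (String × String))) × (List (List (String × String))) :=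
  ([[("date", "2024-02-01"), ("amount", "3")]], [[("date", "2024-01-15")]], [[("date", "2024-02-01")]])

def Spec_get_ordered_deduction_data (pe_data : List (List (String × String))) (re_data : List (List (String × String))) (je_data : List (List (String × String))) (out : List (List (String × String))) : Prop := out = get_ordered_deduction_data_alt pe_data re_data je_data
instance (pe_data : List (List (String × String))) (re_data : List (List (String × String))) (je_data : List (List (String × String))) (out : List (List (String × String))) : Decidable (Spec_get_ordered_deduction_data pe_data re_data je_data out) := by unfold Spec_get_ordered_deduction_data; infer_instance

-- ===== CLAIM (what is proved, stated in full; the proofs are below) =====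
def Claim_equal_get_ordered_deduction_data : Prop := ∀ (pe_data : List (List (String × String))) (re_data : List (List (String × String))) (je_data : List (List (String × String))), Dom_get_ordered_deduction_data pe_data re_data je_data → Pre_get_ordered_deduction_data pe_data re_data je_data → Spec_get_ordered_deduction_data pe_data re_data je_data (get_ordered_deduction_data pe_data re_data je_data)

-- ===== LEMMAS AND PROOFS =====

-- A's dedup loop over a list is Set.update with the mapped dates
theorem pv_dates_loop (l : List (List (String × String))) (acc : List (Option String)) :
    l.foldl (fun acc e => if pvDate e ∈ acc then acc else acc ++ [pvDate e]) acc
      = PySem.Set.update acc (l.map pvDate) := by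
  rw [PySem.Set.update_map_eq_foldl_add]
  simp only [PySem.Set.add_eq_ite]

-- B's group for a date is the filter of the concatenation
theorem pv_group (l : List (List (String × String))) (od : Option String) :
    ((l.foldl (fun g e => g.modify (pvDate e) [] (· ++ [e])) PySem.Dict.empty).getD od [])
      = l.filter (fun e => pvDate e = od) := by
  have h : l.foldl (fun g e => g.modify (pvDate e) [] (· ++ [e])) PySem.Dict.empty
      = (l.map (fun e => (pvDate e, e))).foldl (fun g p => g.modify p.1 [] (· ++ [p.2])) PySem.Dict.empty := by
    rw [List.foldl_map]
  rw [h, PySem.Dict.getD_foldl_modify_append, PySem.Dict.getD_empty, List.nil_append]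
  simp only [List.filter_map, List.map_map, Function.comp_def]
  rw [List.map_id_fun']
  exact List.filter_congr (fun e _ => by rw [Bool.eq_iff_iff, beq_iff_eq, decide_eq_true_iff])

-- A's per-date inner scan appends the filter
theorem pv_scan (l : List (List (String × String))) (acc : List (List (String × String))) (od : Option String) :
    l.foldl (fun a e => if pvDate e = od then a ++ [e] else a) acc
      = acc ++ l.filter (fun e => pvDate e = od) := by
  simpa using PySem.List.foldl_append_ite_eq_filter (fun e => pvDate e = od) l acc

-- ===== VERDICT (by name: the statement is the Claim_ definition above) =====
theorem get_ordered_deduction_data_spec : Claim_equal_get_ordered_deduction_data := by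
  intro pe_data re_data je_data _ _
  unfold Spec_get_ordered_deduction_data get_ordered_deduction_data get_ordered_deduction_data_alt
  -- both sorted lists are sorted (Set.update (Set.update (Set.update [] …) …) …)
  simp only [pv_dates_loop, PySem.Dict.keys_foldl_modify_key, PySem.Dict.keys_empty,
    List.map_append, PySem.Set.update_append]
  -- rewrite both outer loops into flatMaps over that list
  have hA : ∀ (acc : List (List (String × String))) od,
      (fun acc od =>
        je_data.foldl (fun a je => if pvDate je = od then a ++ [je] else a)
          (re_data.foldl (fun a re => if pvDate re = od then a ++ [re] else a)
            (pe_data.foldl (fun a pe => if pvDate pe = od then a ++ [pe] else a) acc))) acc od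
      = acc ++ ((pe_data ++ re_data ++ je_data).filter (fun e => decide (pvDate e = od))) := by
    intro acc od
    simp [pv_scan, List.filter_append]
  have hB : ∀ od,
      ((pe_data ++ re_data ++ je_data).foldl
          (fun g e => g.modify (pvDate e) [] (· ++ [e])) PySem.Dict.empty).getD od []
      = (pe_data ++ re_data ++ je_data).filter (fun e => decide (pvDate e = od)) := by
    intro od; exact pv_group _ od
  calc
    _ = (PySem.List.sorted
          (PySem.Set.update (PySem.Set.update (PySem.Set.update [] (pe_data.map pvDate)) (re_data.map pvDate)) (je_data.map pvDate))
          (fun o => o.getD "") false).foldl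
          (fun acc od => acc ++ ((pe_data ++ re_data ++ je_data).filter (fun e => decide (pvDate e = od)))) [] := by
        apply PySem.List.foldl_congr_mem
        intro acc od _; exact hA acc od
    _ = _ := by
        apply Eq.symm
        apply PySem.List.foldl_congr_mem
        intro acc od _
        rw [hB od]
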